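-- pv_equiv track=rewrite | github.com/Peng-Zhanjie/The-CP1404-Project | Week9/Lyrics/cleanup_file.py | get_fixed_filename
-- ===== SOURCE A (Python) =====
-- def get_fixed_filename(filename):
--     """Return a 'fixed' version of filename."""
--     filename = filename.replace("_", " ")
--     filename=filename.replace("TXT","txt")
--     new_name = filename
--     situation = 0
--     change = 1
--     for char in filename:
--         if situation + 1 == len(filename):
--             situation += 1
--         else:
--             if (char.isspace() is False) and (
--                     filename[situation + 1].isalpha() == True and filename[situation + 1].isupper() == True):
--                 new_name = new_name[:situation + change] + " " + new_name[situation + change:]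
--                 change += 1
--             situation += 1
--     new_name=new_name.title()
--     new_name=new_name.replace("Txt","txt")
--     new_name=new_name.replace(" ","_")
--     return new_name
-- ===== SOURCE B (Python) =====
-- def get_fixed_filename(filename):
--     """Return a 'fixed' version of filename."""
--     name = filename.replace("_", " ").replace("TXT", "txt")
--     # Single pairwise pass: emit a space before every uppercase letter whose
--     # predecessor is not whitespace, appending to a list (no index/slice bookkeeping).
--     out = list(name[:1])
--     for prev, cur in zip(name, name[1:]):
--         if cur.isalpha() and cur.isupper() and not prev.isspace():
--             out.append(" ")
--         out.append(cur)
--     spaced = "".join(out)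
--     return spaced.title().replace("Txt", "txt").replace(" ", "_")
-- ===== Notes on version B (the rewrite author's own statement) =====
-- stated objective: faster
-- what changed: Replaces A's index/counter loop that re-slices and copies the whole growing string at every inserted space with a single pairwise (prev,cur) pass that appends characters (and boundary spaces) to an output list joined once.
import Mathlib
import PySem

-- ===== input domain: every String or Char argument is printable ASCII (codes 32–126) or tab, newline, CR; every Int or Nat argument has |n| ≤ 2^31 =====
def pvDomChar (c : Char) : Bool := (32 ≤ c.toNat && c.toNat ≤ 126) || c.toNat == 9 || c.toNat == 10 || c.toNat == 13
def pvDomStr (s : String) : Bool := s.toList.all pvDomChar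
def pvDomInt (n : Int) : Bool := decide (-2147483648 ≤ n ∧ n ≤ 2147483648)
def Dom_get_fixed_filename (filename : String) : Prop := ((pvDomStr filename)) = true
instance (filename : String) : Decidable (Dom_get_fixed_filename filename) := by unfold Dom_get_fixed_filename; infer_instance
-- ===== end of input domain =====

-- B replaces A's index/slice insertion loop by a single pairwise (prev,cur) pass that
-- appends to an output list; faster because A copies the whole string at each insertion.


-- Shared tail (identical code in both Pythons): str.title(), exact on the ASCII domain,
-- where Python's "cased" characters are exactly the letters (isalpha).
def pvTitle : List Char → Bool → List Char
  | [], _ => []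
  | c :: r, prevCased =>
    if PySem.Chars.isalpha c then
      (if prevCased then PySem.Chars.lowerChar c else PySem.Chars.upperChar c) :: pvTitle r true
    else c :: pvTitle r false

-- identical pre/post processing in both Pythons
def pvPre (filename : String) : List Char :=
  PySem.Chars.replace (PySem.Chars.replace filename.toList ['_'] [' ']) "TXT".toList "txt".toList

def pvPost (nn : List Char) : String :=
  String.ofList (PySem.Chars.replace (PySem.Chars.replace (pvTitle nn false) "Txt".toList "txt".toList) [' '] ['_'])

-- ===== PORT A =====
-- filename[situation+1]: always in range in A's loop; none ⇒ condition false (never hit).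
def pvNextUpper (name : List Char) (i : Nat) : Bool :=
  match name[i]? with
  | some d => PySem.Chars.isalpha d && PySem.Chars.isupper d
  | none => false

-- A's for-loop: state (new_name, situation, change); slice insertion new_name[:k]+" "+new_name[k:]
-- with k = situation+change ≥ 0 is exactly take/drop.
def pvALoop (name : List Char) : List Char → List Char → Nat → Nat → List Char
  | [], nn, _, _ => nn
  | c :: rest, nn, situation, change =>
    if situation + 1 = name.length then
      pvALoop name rest nn (situation + 1) change
    else
      if !PySem.Chars.isspace c && pvNextUpper name (situation + 1) then
        pvALoop name rest (nn.take (situation + change) ++ ' ' :: nn.drop (situation + change))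
          (situation + 1) (change + 1)
      else
        pvALoop name rest nn (situation + 1) change

def get_fixed_filename (filename : String) : String :=
  let name := pvPre filename
  pvPost (pvALoop name name name 0 1)

-- ===== PORT B =====
def pvCut (prev cur : Char) : Bool :=
  PySem.Chars.isalpha cur && PySem.Chars.isupper cur && !PySem.Chars.isspace prev

def get_fixed_filename_alt (filename : String) : String :=
  let name := pvPre filename
  let spaced := (name.zip name.tail).foldl
    (fun out pc => out ++ (if pvCut pc.1 pc.2 then [' ', pc.2] else [pc.2])) (name.take 1)
  pvPost spaced

-- ===== PRECONDITION & SPEC =====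
def Spec_get_fixed_filename (filename : String) (out : String) : Prop := out = get_fixed_filename_alt filename
instance (filename : String) (out : String) : Decidable (Spec_get_fixed_filename filename out) := by unfold Spec_get_fixed_filename; infer_instance

-- ===== CLAIM (what is proved, stated in full; the proofs are below) =====
def Claim_equal_get_fixed_filename : Prop := ∀ (filename : String), Dom_get_fixed_filename filename → Spec_get_fixed_filename filename (get_fixed_filename filename)

-- ===== LEMMAS AND PROOFS =====

-- common specification: the spaced string, by structural recursion on (prev, rest)
def pvMark2 : Char → List Char → List Char
  | _, [] => []
  | a, b :: r => (if pvCut a b then [' ', b] else [b]) ++ pvMark2 b r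

def pvMark : List Char → List Char
  | [] => []
  | a :: r => a :: pvMark2 a r

theorem pvMark2_snoc (r : List Char) (a b : Char) :
    pvMark2 a (r ++ [b]) = pvMark2 a r ++ (if pvCut (r.getLastD a) b then [' ', b] else [b]) := by
  induction r generalizing a with
  | nil => simp [pvMark2]
  | cons x r ih => simp only [List.cons_append, pvMark2, ih x, List.getLastD_cons,
      List.append_assoc]

theorem pvMark_snoc (p : List Char) (c b : Char) :
    pvMark ((p ++ [c]) ++ [b]) = pvMark (p ++ [c]) ++ (if pvCut c b then [' ', b] else [b]) := by
  cases p with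
  | nil => simp [pvMark, pvMark2]
  | cons x p =>
    simp only [List.cons_append, pvMark, pvMark2_snoc, List.getLastD_concat]

-- A-loop invariant
theorem pvALoop_inv (s : List Char) :
    ∀ (p : List Char) (c : Char) (change : Nat),
    p.length + change = (pvMark (p ++ [c])).length →
    pvALoop (p ++ c :: s) (c :: s) (pvMark (p ++ [c]) ++ s) p.length change
      = pvMark (p ++ c :: s) := by
  induction s with
  | nil =>
    intro p c change h
    have hl : p.length + 1 = (p ++ c :: ([] : List Char)).length := by simp
    rw [pvALoop, if_pos hl, pvALoop]
    simp
  | cons b s' ih =>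
    intro p c change h
    rw [pvALoop]
    have hlen : ¬ (p.length + 1 = (p ++ c :: b :: s').length) := by simp
    rw [if_neg hlen]
    have hidx : (p ++ c :: b :: s')[p.length + 1]? = some b := by
      rw [show p ++ c :: b :: s' = (p ++ [c]) ++ b :: s' by simp]
      rw [List.getElem?_append_right (by simp)]
      simp
    have hcond : (!PySem.Chars.isspace c && pvNextUpper (p ++ c :: b :: s') (p.length + 1))
        = pvCut c b := by
      simp only [pvNextUpper, hidx, pvCut]
      cases PySem.Chars.isspace c <;> cases PySem.Chars.isalpha b <;>
        cases PySem.Chars.isupper b <;> rfl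
    rw [hcond]
    have htake : (pvMark (p ++ [c]) ++ b :: s').take (p.length + change) = pvMark (p ++ [c]) := by
      rw [h]; simp
    have hdrop : (pvMark (p ++ [c]) ++ b :: s').drop (p.length + change) = b :: s' := by
      rw [h]; simp
    by_cases hc : pvCut c b
    · rw [if_pos hc, htake, hdrop]
      have hstep : pvMark (p ++ [c]) ++ ' ' :: b :: s' = pvMark ((p ++ [c]) ++ [b]) ++ s' := by
        rw [pvMark_snoc, if_pos hc]; simp
      rw [hstep]
      have := ih (p ++ [c]) b (change + 1)
        (by rw [pvMark_snoc, if_pos hc]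
            simp only [List.length_append, List.length_cons, List.length_nil]; omega)
      simpa using this
    · rw [if_neg (by simp [hc])]
      have hstep : pvMark (p ++ [c]) ++ b :: s' = pvMark ((p ++ [c]) ++ [b]) ++ s' := by
        rw [pvMark_snoc, if_neg hc]; simp
      rw [hstep]
      have := ih (p ++ [c]) b change
        (by rw [pvMark_snoc, if_neg hc]
            simp only [List.length_append, List.length_cons, List.length_nil]; omega)
      simpa using this

theorem pvALoop_eq_mark (name : List Char) :
    pvALoop name name name 0 1 = pvMark name := by
  cases name with
  | nil => rfl
  | cons c rest =>
    have := pvALoop_inv rest [] c 1 (by simp [pvMark, pvMark2])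
    simpa [pvMark, pvMark2] using this

theorem pvBfold_eq_mark2 (r : List Char) :
    ∀ (a : Char) (out : List Char),
    ((a :: r).zip r).foldl
      (fun out pc => out ++ (if pvCut pc.1 pc.2 then [' ', pc.2] else [pc.2])) out
      = out ++ pvMark2 a r := by
  induction r with
  | nil => intro a out; simp [pvMark2]
  | cons b r' ih =>
    intro a out
    simp only [List.zip_cons_cons, List.foldl_cons, pvMark2]
    rw [ih b]
    simp

theorem pvBfold_eq_mark (name : List Char) :
    (name.zip name.tail).foldl
      (fun out pc => out ++ (if pvCut pc.1 pc.2 then [' ', pc.2] else [pc.2])) (name.take 1)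
      = pvMark name := by
  cases name with
  | nil => rfl
  | cons a r => simpa [pvMark] using pvBfold_eq_mark2 r a [a]

-- ===== VERDICT (by name: the statement is the Claim_ definition above) =====
theorem get_fixed_filename_spec : Claim_equal_get_fixed_filename := by
  intro filename _
  unfold Spec_get_fixed_filename get_fixed_filename get_fixed_filename_alt
  simp only [pvALoop_eq_mark, pvBfold_eq_mark]
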